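-- pv_equiv track=rewrite | github.com/murataltindag/KattisPython | commercials.py | max_ending_at_j
-- ===== SOURCE A (Python) =====
-- def max_ending_at_j(j, breaks):
--     max_so_far = 0
--     sum = 0
--     for i in range(j, -1, -1):
--         sum += breaks[i]
--         if sum > max_so_far:
--             max_so_far = sum
--         i -= 1
--     return max_so_far
-- ===== SOURCE B (Python) =====
-- def max_ending_at_j(j, breaks):
--     # prefix sums with a running minimum instead of A's backward suffix scan
--     if j < 0:
--         return 0
--     running = 0
--     min_prefix = 0
--     for i in range(j):
--         running += breaks[i]
--         if running < min_prefix: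
--             min_prefix = running
--     total = running + breaks[j]
--     return max(0, total - min_prefix)
-- ===== Notes on version B (the rewrite author's own statement) =====
-- stated objective: alternative
-- what changed: Replaces A's backward suffix accumulation from j down to 0 with a single forward pass over prefix sums keeping a running minimum prefix, returning max(0, P[j+1] - min prefix).
import Mathlib
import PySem

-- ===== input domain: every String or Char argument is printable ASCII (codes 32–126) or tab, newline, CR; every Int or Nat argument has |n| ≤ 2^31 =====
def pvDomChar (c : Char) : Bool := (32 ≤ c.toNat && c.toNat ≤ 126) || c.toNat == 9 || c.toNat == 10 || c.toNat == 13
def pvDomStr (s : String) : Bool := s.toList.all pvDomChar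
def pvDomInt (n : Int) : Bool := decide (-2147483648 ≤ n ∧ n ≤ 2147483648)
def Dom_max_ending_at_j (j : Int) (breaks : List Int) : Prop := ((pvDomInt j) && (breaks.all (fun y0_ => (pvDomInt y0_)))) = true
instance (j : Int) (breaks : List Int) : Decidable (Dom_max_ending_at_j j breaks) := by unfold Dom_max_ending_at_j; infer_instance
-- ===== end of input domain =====

-- B replaces A's backward suffix accumulation with a forward prefix-sum pass keeping a running minimum prefix (alternative decomposition, same cost).


-- ===== PORT A =====
-- literal port of A: fold over range(j, -1, -1), state (max_so_far, sum)
def max_ending_at_j (j : Int) (breaks : List Int) : Int :=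
  ((PySem.List.pyRange j (-1) (-1)).foldl
    (fun (st : Int × Int) i =>
      let s := st.2 + PySem.List.pyGetD breaks i 0
      (if s > st.1 then s else st.1, s)) (0, 0)).1

-- ===== PORT B =====
-- literal port of Source B: forward pass over range(j), state (running, min_prefix)
def max_ending_at_j_alt (j : Int) (breaks : List Int) : Int :=
  if j < 0 then 0
  else
    let st := (PySem.List.pyRange 0 j 1).foldl
      (fun (st : Int × Int) i =>
        let r := st.1 + PySem.List.pyGetD breaks i 0
        (r, if r < st.2 then r else st.2)) (0, 0)
    let total := st.1 + PySem.List.pyGetD breaks j 0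
    max 0 (total - st.2)

-- ===== PRECONDITION & SPEC =====
-- Pre_ excludes only j ≥ len(breaks), where A raises IndexError at breaks[j].
def Pre_max_ending_at_j (j : Int) (breaks : List Int) : Prop := j < (breaks.length : Int)
instance (j : Int) (breaks : List Int) : Decidable (Pre_max_ending_at_j j breaks) := by unfold Pre_max_ending_at_j; infer_instance
def pvWitness_max_ending_at_j : Int × List Int := (2, [1, -2, 3])

def Spec_max_ending_at_j (j : Int) (breaks : List Int) (out : Int) : Prop := out = max_ending_at_j_alt j breaks
instance (j : Int) (breaks : List Int) (out : Int) : Decidable (Spec_max_ending_at_j j breaks out) := by unfold Spec_max_ending_at_j; infer_instance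

-- ===== CLAIM (what is proved, stated in full; the proofs are below) =====
def Claim_equal_max_ending_at_j : Prop := ∀ (j : Int) (breaks : List Int), Dom_max_ending_at_j j breaks → Pre_max_ending_at_j j breaks → Spec_max_ending_at_j j breaks (max_ending_at_j j breaks)

-- ===== LEMMAS AND PROOFS =====

-- max over all suffix sums of L (including the empty suffix)
def maxSuffix : List Int → Int
  | [] => 0
  | x :: t => max (x + t.sum) (maxSuffix t)

-- min over all prefix sums of L (including the empty prefix)
def pmin : List Int → Int
  | [] => 0
  | x :: t => min 0 (x + pmin t)

lemma pmin_nonpos : ∀ L : List Int, pmin L ≤ 0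
  | [] => le_refl 0
  | x :: t => by simp [pmin]

-- A's loop over L.reverse computes (maxSuffix L, L.sum)
lemma foldA_spec : ∀ L : List Int,
    L.reverse.foldl (fun (st : Int × Int) v =>
      (if st.2 + v > st.1 then st.2 + v else st.1, st.2 + v)) (0, 0)
    = (maxSuffix L, L.sum)
  | [] => rfl
  | x :: t => by
    rw [List.reverse_cons, List.foldl_append, foldA_spec t]
    simp only [List.foldl_cons, List.foldl_nil, maxSuffix, List.sum_cons, Prod.mk.injEq]
    constructor
    · split_ifs with h <;> omega
    · omega

-- B's loop computes (s + L.sum, min of {m} ∪ {s + nonempty prefix sums}), provided m ≤ s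
lemma foldB_spec : ∀ (L : List Int) (s m : Int), m ≤ s →
    L.foldl (fun (st : Int × Int) v =>
      (st.1 + v, if st.1 + v < st.2 then st.1 + v else st.2)) (s, m)
    = (s + L.sum, min m (s + pmin L))
  | [], s, m, h => by
    simp only [List.foldl_nil, pmin, List.sum_nil, Prod.mk.injEq]
    constructor <;> omega
  | x :: t, s, m, h => by
    simp only [List.foldl_cons]
    rw [show (if s + x < m then s + x else m) = min m (s + x) by split_ifs <;> omega]
    rw [foldB_spec t (s + x) (min m (s + x)) (by omega)]
    have hp := pmin_nonpos t
    simp only [List.sum_cons, pmin, Prod.mk.injEq]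
    constructor <;> omega

-- the key identity between the two decompositions
lemma suffix_prefix : ∀ (L : List Int) (b : Int),
    maxSuffix (L ++ [b]) = max 0 (L.sum + b - pmin L)
  | [], b => by simp [maxSuffix, pmin]; omega
  | x :: t, b => by
    simp only [List.cons_append, maxSuffix, List.sum_append, List.sum_cons,
      List.sum_nil, pmin, suffix_prefix t b]
    omega

-- a forward index fold over range(0, k) of breaks[i] is the fold over take k breaks
lemma foldl_idx (breaks : List Int) (g : (Int × Int) → Int → (Int × Int)) :
    ∀ (k : Nat), k ≤ breaks.length → ∀ (init : Int × Int),
    (PySem.List.pyRange 0 (k : Int) 1).foldl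
      (fun st i => g st (PySem.List.pyGetD breaks i 0)) init
    = (breaks.take k).foldl g init
  | 0, _, init => by
    rw [PySem.List.pyRange_one_eq_nil (by omega)]; rfl
  | k + 1, hk, init => by
    rw [show ((k + 1 : Nat) : Int) = (k : Int) + 1 by omega,
        PySem.List.pyRange_one_succ_right (by omega), List.foldl_append,
        foldl_idx breaks g k (by omega) init, List.take_add_one,
        List.getElem?_eq_getElem (by omega), List.foldl_append]
    simp only [Option.toList_some, List.foldl_cons, List.foldl_nil,
      PySem.List.pyGetD_natCast, List.getD_eq_getElem breaks 0 (n := k) (by omega)]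

-- a backward index fold over reversed range(0, k) is the fold over (take k breaks).reverse
lemma foldl_idx_rev (breaks : List Int) (g : (Int × Int) → Int → (Int × Int)) :
    ∀ (k : Nat), k ≤ breaks.length → ∀ (init : Int × Int),
    ((PySem.List.pyRange 0 (k : Int) 1).reverse).foldl
      (fun st i => g st (PySem.List.pyGetD breaks i 0)) init
    = ((breaks.take k).reverse).foldl g init
  | 0, _, init => by
    rw [PySem.List.pyRange_one_eq_nil (by omega)]; rfl
  | k + 1, hk, init => by
    rw [show ((k + 1 : Nat) : Int) = (k : Int) + 1 by omega,
        PySem.List.pyRange_one_succ_right (by omega), List.reverse_append,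
        List.take_add_one, List.getElem?_eq_getElem (by omega), List.reverse_append]
    simp only [Option.toList_some, List.reverse_cons, List.reverse_nil, List.nil_append,
      List.singleton_append, List.foldl_cons, PySem.List.pyGetD_natCast,
      List.getD_eq_getElem breaks 0 (n := k) (by omega)]
    exact foldl_idx_rev breaks g k (by omega) _

-- ===== VERDICT (by name: the statement is the Claim_ definition above) =====
theorem max_ending_at_j_spec : Claim_equal_max_ending_at_j := by
  intro j breaks _ hpre
  unfold Spec_max_ending_at_j max_ending_at_j max_ending_at_j_alt
  unfold Pre_max_ending_at_j at hpre
  by_cases hj : j < 0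
  · rw [if_pos hj, PySem.List.pyRange_neg_one_eq_nil (by omega)]
    rfl
  · rw [if_neg hj]
    rw [not_lt] at hj
    obtain ⟨n, rfl⟩ : ∃ n : Nat, j = (n : Int) := ⟨j.toNat, by omega⟩
    have hn : n < breaks.length := by omega
    dsimp only
    rw [PySem.List.pyRange_neg_one_eq_reverse,
        show (-1 : Int) + 1 = 0 by norm_num,
        show (n : Int) + 1 = (((n + 1 : Nat) : Nat) : Int) by omega]
    rw [foldl_idx_rev breaks
          (fun st v => (if st.2 + v > st.1 then st.2 + v else st.1, st.2 + v))
          (n + 1) (by omega) (0, 0),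
        foldl_idx breaks
          (fun st v => (st.1 + v, if st.1 + v < st.2 then st.1 + v else st.2))
          n (by omega) (0, 0)]
    rw [foldA_spec, foldB_spec _ 0 0 (le_refl 0)]
    rw [List.take_add_one, List.getElem?_eq_getElem (by omega)]
    simp only [Option.toList_some]
    rw [suffix_prefix]
    rw [PySem.List.pyGetD_natCast, List.getD_eq_getElem breaks 0 (n := n) (by omega)]
    have hp := pmin_nonpos (breaks.take n)
    omega
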